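-- pv_equiv track=rewrite | github.com/DEOWL-kan/ai-image-trust-scanner | scripts/day14_prepare_dataset.py | variant_scene_counts
-- ===== SOURCE A (Python) =====
-- from collections import defaultdict
--
-- def variant_scene_counts(rows: list[dict[str, str]]) -> list[dict[str, str]]:
--     counts: dict[tuple[str, str], int] = defaultdict(int)
--     for row in rows:
--         counts[(row["label"], row["scene_type"])] += 1
--     return [
--         {"label": label, "scene_type": scene, "count": str(count)}
--         for (label, scene), count in sorted(counts.items())
--     ]
-- ===== SOURCE B (Python) =====
-- def variant_scene_counts(rows: list[dict[str, str]]) -> list[dict[str, str]]: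
--     keys = sorted((row["label"], row["scene_type"]) for row in rows)
--     runs: list[tuple[tuple[str, str], int]] = []
--     for k in keys:
--         if runs and runs[-1][0] == k:
--             runs[-1] = (k, runs[-1][1] + 1)
--         else:
--             runs.append((k, 1))
--     return [
--         {"label": label, "scene_type": scene, "count": str(count)}
--         for (label, scene), count in runs
--     ]
-- ===== Notes on version B (the rewrite author's own statement) =====
-- stated objective: alternative
-- what changed: Replaces A's hash-map accumulation followed by a sort of the (key,count) items with sort-then-collapse-runs: sort all (label,scene_type) key pairs first, then one run-length-encoding pass over the sorted sequence emits each distinct key with the length of its run.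
import Mathlib
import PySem

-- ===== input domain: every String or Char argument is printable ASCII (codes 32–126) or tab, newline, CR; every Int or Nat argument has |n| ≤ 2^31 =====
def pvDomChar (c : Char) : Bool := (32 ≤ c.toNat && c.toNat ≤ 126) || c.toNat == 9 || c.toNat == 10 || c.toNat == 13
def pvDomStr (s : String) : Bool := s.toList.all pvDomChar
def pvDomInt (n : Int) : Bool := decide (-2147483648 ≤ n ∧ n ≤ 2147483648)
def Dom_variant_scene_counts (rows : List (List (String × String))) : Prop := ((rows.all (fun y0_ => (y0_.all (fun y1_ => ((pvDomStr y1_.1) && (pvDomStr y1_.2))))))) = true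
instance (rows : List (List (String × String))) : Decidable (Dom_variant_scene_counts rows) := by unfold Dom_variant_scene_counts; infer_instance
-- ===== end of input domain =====

-- B replaces A's hash-map accumulation + sort of the items with sort-then-collapse-runs: sort all
-- key pairs, then one run-length-encoding pass; return values proved equal on rows that carry both keys.

-- (row["label"], row["scene_type"]) — both Pythons compute this same expression; getD "" is exact
-- under Pre_variant_scene_counts, which guarantees both keys are present (otherwise Python raises KeyError).
def pvKey (row : List (String × String)) : String × String :=
  (PySem.Dict.getD ⟨row⟩ "label" "", PySem.Dict.getD ⟨row⟩ "scene_type" "")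

-- ===== PORT A =====
-- sorted(counts.items()) compares ((label,scene),count) tuples lexicographically; since a dict's keys
-- are unique the count component can never decide the order, so sorting on the two string components
-- alone (sorted2) is exact here.
def variant_scene_counts (rows : List (List (String × String))) : List (List (String × String)) :=
  (PySem.List.sorted2
      (rows.foldl (fun d row => d.modify (pvKey row) 0 (· + 1)) PySem.Dict.empty).items
      (fun x => x.1.1) (fun x => x.1.2) false).map
    (fun x => [("label", x.1.1), ("scene_type", x.1.2), ("count", PySem.Int.toStr x.2)])

-- ===== PORT B =====
-- the loop body of Source B: acc holds the runs NEWEST FIRST (its head is Python's runs[-1]);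
-- the port reverses it at the end to recover Python's append order.
def pvRleStep (acc : List ((String × String) × Int)) (k : String × String) :
    List ((String × String) × Int) :=
  match acc with
  | (k', c) :: rest => if k' = k then (k, c + 1) :: rest else (k, 1) :: (k', c) :: rest
  | [] => [(k, 1)]

def variant_scene_counts_alt (rows : List (List (String × String))) : List (List (String × String)) :=
  (((PySem.List.sorted2 (rows.map pvKey) (fun k => k.1) (fun k => k.2) false).foldl
      pvRleStep []).reverse).map
    (fun x => [("label", x.1.1), ("scene_type", x.1.2), ("count", PySem.Int.toStr x.2)])

-- ===== PRECONDITION & SPEC =====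
-- Pre_ excludes exactly the rows on which Python raises KeyError (a row missing "label" or "scene_type").
def Pre_variant_scene_counts (rows : List (List (String × String))) : Prop :=
  (rows.all (fun row => (PySem.Dict.get? ⟨row⟩ "label").isSome
                        && (PySem.Dict.get? ⟨row⟩ "scene_type").isSome)) = true
instance (rows : List (List (String × String))) : Decidable (Pre_variant_scene_counts rows) := by
  unfold Pre_variant_scene_counts; infer_instance

def pvWitness_variant_scene_counts : (List (List (String × String))) :=
  [[("label", "ai"), ("scene_type", "indoor")], [("label", "real"), ("scene_type", "indoor")],
   [("label", "ai"), ("scene_type", "indoor")]]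

def Spec_variant_scene_counts (rows : List (List (String × String))) (out : List (List (String × String))) : Prop := out = variant_scene_counts_alt rows
instance (rows : List (List (String × String))) (out : List (List (String × String))) : Decidable (Spec_variant_scene_counts rows out) := by unfold Spec_variant_scene_counts; infer_instance

-- ===== CLAIM (what is proved, stated in full; the proofs are below) =====
def Claim_equal_variant_scene_counts : Prop := ∀ (rows : List (List (String × String))), Dom_variant_scene_counts rows → Pre_variant_scene_counts rows → Spec_variant_scene_counts rows (variant_scene_counts rows)

-- ===== LEMMAS AND PROOFS =====

-- sorted2's pair comparator is exactly strict lexicographic order on (k1 x, k2 x)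
theorem pv_sorted2_eq_sorted {α κ₁ κ₂ : Type} [LinearOrder κ₁] [LinearOrder κ₂]
    (xs : List α) (k1 : α → κ₁) (k2 : α → κ₂) :
    PySem.List.sorted2 xs k1 k2 false
      = PySem.List.sorted xs (fun x => toLex (k1 x, k2 x)) false := by
  rw [PySem.List.sorted_eq_foldl_insertBy]
  have hcmp : (fun (a b : α) => decide (k1 a < k1 b) || (!decide (k1 b < k1 a) && decide (k2 a < k2 b)))
      = fun a b => decide ((fun x => toLex (k1 x, k2 x)) a < (fun x => toLex (k1 x, k2 x)) b) := by
    funext a b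
    simp only [Prod.Lex.toLex_lt_toLex]
    by_cases h : k1 a < k1 b
    · simp [h]
    · by_cases h' : k1 b < k1 a
      · simp [h, h', ne_of_gt h']
      · have he : k1 a = k1 b := le_antisymm (not_lt.mp h') (not_lt.mp h)
        simp [he]
  simp only [PySem.List.sorted2, if_neg (by simp : ¬ (false = true))]
  rw [hcmp]

-- a key-nondecreasing nodup list is key-strictly-increasing when the key is injective
theorem pv_pairwise_lt {α κ : Type} [LinearOrder κ] {l : List α} {key : α → κ}
    (hinj : Function.Injective key)
    (hle : l.Pairwise (fun a b => key a ≤ key b)) (hnd : l.Nodup) :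
    l.Pairwise (fun a b => key a < key b) :=
  (hle.and hnd).imp (fun h => lt_of_le_of_ne h.1 (fun he => h.2 (hinj he)))

theorem pv_dedup_append {α : Type} [BEq α] [LawfulBEq α] (L : List α) (x : α) :
    PySem.List.dedup (L ++ [x])
      = if x ∈ L then PySem.List.dedup L else PySem.List.dedup L ++ [x] := by
  simp only [PySem.List.dedup_eq_ofList, PySem.Set.ofList_eq_foldl, List.foldl_append,
    List.foldl_cons, List.foldl_nil, PySem.Set.add]
  by_cases h : x ∈ List.foldl PySem.Set.add [] L
  · simp_all [← PySem.Set.ofList_eq_foldl, PySem.Set.mem_ofList]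
  · simp_all [← PySem.Set.ofList_eq_foldl, PySem.Set.mem_ofList]

theorem pv_dedup_sublist {α : Type} [BEq α] [LawfulBEq α] (L : List α) :
    (PySem.List.dedup L).Sublist L := by
  induction L using List.reverseRecOn with
  | nil => simp [PySem.List.dedup_eq_ofList, PySem.Set.ofList_eq_foldl]
  | append_singleton L x ih =>
      rw [pv_dedup_append]
      by_cases h : x ∈ L
      · simpa [h] using ih.trans (List.sublist_append_left L [x])
      · simpa [h] using ih.append (List.Sublist.refl [x])

-- run-length encoding of a sorted list = each distinct key with its multiplicity
theorem pv_rle_eq (L : List (String × String))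
    (h : L.Pairwise (fun a b => toLex a ≤ toLex b)) :
    L.foldl pvRleStep []
      = ((PySem.List.dedup L).map (fun k => (k, (L.count k : Int)))).reverse := by
  induction L using List.reverseRecOn with
  | nil => simp [PySem.List.dedup_eq_ofList, PySem.Set.ofList_eq_foldl]
  | append_singleton L x ih =>
      have hsplit := List.pairwise_append.mp h
      have hL : L.Pairwise (fun a b => toLex a ≤ toLex b) := hsplit.1
      have hmem : ∀ a ∈ L, toLex a ≤ toLex x := fun a ha =>
        hsplit.2.2 a ha x (by simp)
      rw [List.foldl_append, List.foldl_cons, List.foldl_nil, ih hL]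
      rcases List.eq_nil_or_concat (PySem.List.dedup L) with hM | ⟨M₀, m, hM⟩
      · -- dedup L = [] → L = []
        have hLnil : L = [] := by
          rcases L with _ | ⟨a, t⟩
          · rfl
          · have ha : a ∈ PySem.List.dedup (a :: t) :=
              (PySem.List.mem_dedup _ a).mpr (by simp)
            rw [hM] at ha
            exact absurd ha (by simp)
        subst hLnil
        simp [pvRleStep, PySem.List.dedup_eq_ofList,
          PySem.Set.ofList_eq_foldl]
      · have hnd : (PySem.List.dedup L).Nodup := PySem.List.nodup_dedup L
        have hmM : m ∈ PySem.List.dedup L := by rw [hM]; simp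
        have hmL : m ∈ L := (PySem.List.mem_dedup L m).mp hmM
        have hndM : ∀ k ∈ M₀, k ≠ m := by
          rw [hM, List.concat_eq_append] at hnd
          intro k hk
          exact fun he => (List.pairwise_append.mp hnd).2.2 k hk m (by simp) he
        rw [hM, List.concat_eq_append, List.map_append, List.reverse_append]
        simp only [List.map_cons, List.map_nil, List.reverse_cons, List.reverse_nil,
          List.nil_append, List.singleton_append]
        by_cases hx : m = x
        · -- x continues the last run
          subst hx
          rw [pv_dedup_append, if_pos hmL, hM, List.concat_eq_append]
          simp only [pvRleStep, if_true, List.map_append, List.map_cons,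
            List.map_nil, List.reverse_append, List.reverse_cons, List.reverse_nil,
            List.nil_append, List.singleton_append]
          congr 1
          · simp [List.count_append]
          · apply congrArg
            apply List.map_congr_left
            intro k hk
            simp [List.count_append, Ne.symm (hndM k hk)]
        · -- new run: x cannot occur in L
          have hxL : x ∉ L := by
            intro hxin
            have hxM : x ∈ PySem.List.dedup L := (PySem.List.mem_dedup L x).mpr hxin
            have hxM₀ : x ∈ M₀ := by
              rw [hM, List.concat_eq_append] at hxM
              rcases List.mem_append.mp hxM with h' | h'
              · exact h'
              · exact absurd (List.mem_singleton.mp h').symm hx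
            -- dedup L is pairwise ≤, so toLex x ≤ toLex m; and toLex m ≤ toLex x
            have hdle : (PySem.List.dedup L).Pairwise (fun a b => toLex a ≤ toLex b) :=
              List.Pairwise.sublist (pv_dedup_sublist L) hL
            rw [hM, List.concat_eq_append] at hdle
            have h1 : toLex x ≤ toLex m :=
              (List.pairwise_append.mp hdle).2.2 x hxM₀ m (by simp)
            have h2 : toLex m ≤ toLex x := hmem m hmL
            exact hx (toLex.injective (le_antisymm h2 h1))
          rw [pv_dedup_append, if_neg hxL, hM, List.concat_eq_append]
          simp only [pvRleStep, if_neg (by exact hx), List.append_assoc, List.singleton_append,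
            List.map_append, List.map_cons, List.map_nil, List.reverse_append,
            List.reverse_cons, List.reverse_nil, List.nil_append, List.singleton_append]
          congr 1
          · simp [List.count_append, List.count_eq_zero_of_not_mem hxL]
          congr 1
          · simp [List.count_append, Ne.symm hx]
          · apply congrArg
            apply List.map_congr_left
            intro k hk
            have hkx : k ≠ x := fun he => hxL (he ▸ ((PySem.List.mem_dedup L k).mp
              (by rw [hM, List.concat_eq_append]; exact List.mem_append_left _ hk)))
            simp [List.count_append, Ne.symm hkx]

-- ===== VERDICT (by name: the statement is the Claim_ definition above) =====
theorem variant_scene_counts_spec : Claim_equal_variant_scene_counts := by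
  intro rows _ _
  unfold Spec_variant_scene_counts variant_scene_counts variant_scene_counts_alt
  have hc : rows.foldl (fun d row => d.modify (pvKey row) 0 (· + 1)) PySem.Dict.empty
      = PySem.Dict.counter (rows.map pvKey) := by
    rw [PySem.Dict.counter_eq_foldl, List.foldl_map]
  set keys := rows.map pvKey with hkeys
  set L := PySem.List.sorted keys (fun k => toLex (k.1, k.2)) false with hLdef
  have hLsort : L.Pairwise (fun a b => toLex a ≤ toLex b) := by
    simpa using PySem.List.sorted_pairwise keys (fun k => toLex (k.1, k.2))
  have hLperm : L.Perm keys := PySem.List.sorted_perm _ _ _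
  -- A's sorted items = B's sorted distinct keys, paired with the multiplicities
  have hsorted_items :
      PySem.List.sorted ((PySem.Set.ofList keys : List (String × String)).map
          (fun k => (k, (keys.count k : Int)))) (fun x => toLex (x.1.1, x.1.2)) false
        = (PySem.List.dedup L).map (fun k => (k, (keys.count k : Int))) := by
    apply PySem.List.sorted_eq_of_perm_of_pairwise_lt
    · apply List.Perm.map
      apply (List.perm_ext_iff_of_nodup (PySem.List.nodup_dedup L)
        (PySem.Set.nodup_ofList keys)).mpr
      intro k
      rw [PySem.List.mem_dedup, PySem.Set.mem_ofList, hLperm.mem_iff]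
    · rw [List.pairwise_map]
      exact pv_pairwise_lt toLex.injective
        (List.Pairwise.sublist (pv_dedup_sublist L) hLsort) (PySem.List.nodup_dedup L)
  rw [hc, PySem.Dict.items_counter, pv_sorted2_eq_sorted, pv_sorted2_eq_sorted,
    hsorted_items, ← hLdef, pv_rle_eq L hLsort, List.reverse_reverse]
  apply congrArg
  apply List.map_congr_left
  intro k _
  rw [hLperm.count_eq]
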